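-- pv_equiv track=rewrite | github.com/dkonidena/AICSWK-Timetable | scheduler.py | maxSlots
-- ===== SOURCE A (Python) =====
-- def maxSlots(slotsAssigned, slotDomain):
-- 	maxSlots = -1
-- 	possible = []
-- 	try:
-- 		# iterating through the given list and checking the respective days for each individual possible
-- 		# assignment. If it is a max or equals the max number of slots.
-- 		for slots in slotsAssigned:
-- 			for days in slotsAssigned[slots][1]:
-- 				if slotDomain[days] > maxSlots:
-- 					possible = []
-- 					maxSlots = slotDomain[days]
-- 					assignment = [slots, slotsAssigned[slots][0], days]
-- 					possible.append(assignment)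
-- 				elif slotDomain[days] == maxSlots:
-- 					assignment = [slots, slotsAssigned[slots][0], days]
-- 					possible.append(assignment)
-- 	except:
-- 		return None
-- 	return possible
-- ===== SOURCE B (Python) =====
-- def maxSlots(slotsAssigned, slotDomain):
--     try:
--         triples = [(s, slotsAssigned[s][0], d)
--                    for s in slotsAssigned for d in slotsAssigned[s][1]]
--         vals = [slotDomain[d] for (_, _, d) in triples]
--         m = max(vals, default=-1)
--         return [[s, t, d] for (s, t, d), v in zip(triples, vals) if v == m]
--     except:
--         return None
-- ===== Notes on version B (the rewrite author's own statement) =====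
-- stated objective: alternative
-- what changed: A's single fused loop that tracks a running max with a -1 sentinel and resets/extends the tie list is replaced by a two-phase decomposition: flatten to (slot, teacher, day) triples, look up all values, compute the max once, then filter the ties in order.
-- intended difference: When every day reachable from slotsAssigned has a slotDomain value < -1 (and at least one day is reachable), A's -1 sentinel discards them all and A returns [], while B returns the assignments with the true maximal domain value, which is the intended result of 'find assignments with max domain value'. — e.g. on maxSlots([("s", ("t", ["d"]))], [("d", -2)]): A returns some [], B returns some [["s", "t", "d"]]
import Mathlib
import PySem

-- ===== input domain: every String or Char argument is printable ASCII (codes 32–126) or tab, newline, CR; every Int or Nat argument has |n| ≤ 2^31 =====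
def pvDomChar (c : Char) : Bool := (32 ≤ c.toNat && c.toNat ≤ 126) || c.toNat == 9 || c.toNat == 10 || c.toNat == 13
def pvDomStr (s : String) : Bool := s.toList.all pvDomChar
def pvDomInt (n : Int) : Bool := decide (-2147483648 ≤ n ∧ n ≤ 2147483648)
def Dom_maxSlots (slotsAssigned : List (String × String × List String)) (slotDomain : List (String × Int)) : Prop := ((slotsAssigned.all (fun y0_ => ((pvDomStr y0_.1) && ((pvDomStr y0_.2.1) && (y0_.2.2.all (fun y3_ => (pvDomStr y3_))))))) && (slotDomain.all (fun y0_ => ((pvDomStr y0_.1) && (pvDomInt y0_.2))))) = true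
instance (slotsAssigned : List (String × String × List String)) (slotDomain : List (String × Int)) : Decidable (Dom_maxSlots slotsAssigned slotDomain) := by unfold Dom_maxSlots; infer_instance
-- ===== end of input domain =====

-- B replaces A's single fused max-tracking loop (with its -1 sentinel) by a two-phase pass:
-- flatten to (slot, teacher, day) triples, look all values up, take the max, filter the ties.
-- Return values only are compared; B intentionally differs from A on the D_ corner stated below.

-- ===== PORT A =====
-- A's parameters are Python dicts; iterating `for slots in slotsAssigned` and indexing
-- `slotsAssigned[slots]` is iterating the dict's items (keys are unique, lookup succeeds).
def maxSlots (slotsAssigned : List (String × String × List String)) (slotDomain : List (String × Int)) : Option (List (List String)) :=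
  let dd := PySem.Dict.ofList slotDomain
  -- state (maxSlots, possible); the try/except is the Option monad: none = an exception → return None
  match (PySem.Dict.ofList slotsAssigned).items.foldlM
      (fun (st : Int × List (List String)) kv =>
        kv.2.2.foldlM
          (fun (st : Int × List (List String)) days =>
            match dd.get? days with      -- slotDomain[days]; none = KeyError
            | none => none
            | some v =>
              if v > st.1 then some (v, [[kv.1, kv.2.1, days]])
              else if v = st.1 then some (st.1, st.2 ++ [[kv.1, kv.2.1, days]])
              else some st)
          st)
      ((-1 : Int), ([] : List (List String))) with
  | none => none
  | some st => some st.2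

-- ===== PORT B =====
def maxSlots_alt (slotsAssigned : List (String × String × List String)) (slotDomain : List (String × Int)) : Option (List (List String)) :=
  let dd := PySem.Dict.ofList slotDomain
  let triples := (PySem.Dict.ofList slotsAssigned).items.flatMap
      (fun kv => kv.2.2.map (fun days => (kv.1, kv.2.1, days)))
  match triples.mapM (fun t => dd.get? t.2.2) with    -- [slotDomain[d] for …]; none = KeyError → None
  | none => none
  | some vals =>
    let m := PySem.List.maxD vals id (-1)             -- max(vals, default=-1)
    some (((triples.zip vals).filter (fun tv => tv.2 == m)).map
      (fun tv => [tv.1.1, tv.1.2.1, tv.1.2.2]))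

-- ===== PRECONDITION & SPEC =====
-- Intended difference: when every day reachable from slotsAssigned has a slotDomain value < -1
-- (and at least one day is reachable), A's -1 sentinel discards them all and A returns [],
-- while B returns the assignments with the true maximal domain value, which is what the
-- function is for ("find assignments with max domain value").
def D_maxSlots (slotsAssigned : List (String × String × List String)) (slotDomain : List (String × Int)) : Prop :=
  (PySem.Dict.ofList slotsAssigned).items.flatMap (fun kv => kv.2.2) ≠ [] ∧
  ∀ day ∈ (PySem.Dict.ofList slotsAssigned).items.flatMap (fun kv => kv.2.2),
    (((PySem.Dict.ofList slotDomain).get? day).any (fun v => v < -1)) = true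
instance (slotsAssigned : List (String × String × List String)) (slotDomain : List (String × Int)) : Decidable (D_maxSlots slotsAssigned slotDomain) := by unfold D_maxSlots; infer_instance

def Spec_maxSlots (slotsAssigned : List (String × String × List String)) (slotDomain : List (String × Int)) (out : Option (List (List String))) : Prop := ¬ D_maxSlots slotsAssigned slotDomain → out = maxSlots_alt slotsAssigned slotDomain
instance (slotsAssigned : List (String × String × List String)) (slotDomain : List (String × Int)) (out : Option (List (List String))) : Decidable (Spec_maxSlots slotsAssigned slotDomain out) := by unfold Spec_maxSlots; infer_instance

def pvDiffWitness_maxSlots : (List (String × String × List String)) × (List (String × Int)) :=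
  ([("s", ("t", ["d"]))], [("d", -2)])
def pvDiffWitnessOut_maxSlots : (Option (List (List String))) × (Option (List (List String))) :=
  (some [], some [["s", "t", "d"]])

-- ===== CLAIM (what is proved, stated in full; the proofs are below) =====
def Claim_unchanged_maxSlots : Prop := ∀ (slotsAssigned : List (String × String × List String)) (slotDomain : List (String × Int)), Dom_maxSlots slotsAssigned slotDomain → Spec_maxSlots slotsAssigned slotDomain (maxSlots slotsAssigned slotDomain)
def Claim_changed_maxSlots : Prop := Dom_maxSlots (pvDiffWitness_maxSlots.1) (pvDiffWitness_maxSlots.2) ∧ D_maxSlots (pvDiffWitness_maxSlots.1) (pvDiffWitness_maxSlots.2) ∧ maxSlots (pvDiffWitness_maxSlots.1) (pvDiffWitness_maxSlots.2) = pvDiffWitnessOut_maxSlots.1 ∧ maxSlots_alt (pvDiffWitness_maxSlots.1) (pvDiffWitness_maxSlots.2) = pvDiffWitnessOut_maxSlots.2 ∧ pvDiffWitnessOut_maxSlots.1 ≠ pvDiffWitnessOut_maxSlots.2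
def Claim_exact_maxSlots : Prop := ∀ (slotsAssigned : List (String × String × List String)) (slotDomain : List (String × Int)), Dom_maxSlots slotsAssigned slotDomain → D_maxSlots slotsAssigned slotDomain → maxSlots slotsAssigned slotDomain ≠ maxSlots_alt slotsAssigned slotDomain

-- ===== LEMMAS AND PROOFS =====

-- the rendered assignment [slots, teacher, day]
def pvRend (t : String × String × String) : List String := [t.1, t.2.1, t.2.2]
def pvStep (st : Int × List (List String)) (tv : (String × String × String) × Int) :
    Int × List (List String) :=
  if tv.2 > st.1 then (tv.2, [pvRend tv.1])
  else if tv.2 = st.1 then (st.1, st.2 ++ [pvRend tv.1])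
  else st
def pvStepM (dd : PySem.Dict String Int) (st : Int × List (List String))
    (t : String × String × String) : Option (Int × List (List String)) :=
  match dd.get? t.2.2 with
  | none => none
  | some v =>
    if v > st.1 then some (v, [pvRend t])
    else if v = st.1 then some (st.1, st.2 ++ [pvRend t])
    else some st

theorem pvFlattenA (dd : PySem.Dict String Int)
    (items : List (String × String × List String)) (st : Int × List (List String)) :
    items.foldlM
      (fun (st : Int × List (List String)) kv =>
        kv.2.2.foldlM
          (fun (st : Int × List (List String)) days =>
            match dd.get? days with
            | none => none
            | some v =>
              if v > st.1 then some (v, [[kv.1, kv.2.1, days]])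
              else if v = st.1 then some (st.1, st.2 ++ [[kv.1, kv.2.1, days]])
              else some st)
          st)
      st
    = (items.flatMap (fun kv => kv.2.2.map (fun d => (kv.1, kv.2.1, d)))).foldlM (pvStepM dd) st := by
  induction items generalizing st with
  | nil => rfl
  | cons kv rest ih =>
    simp only [List.foldlM_cons, List.flatMap_cons, List.foldlM_append, List.foldlM_map]
    have hinner : kv.2.2.foldlM
        (fun (st : Int × List (List String)) days =>
          match dd.get? days with
          | none => none
          | some v =>
            if v > st.1 then some (v, [[kv.1, kv.2.1, days]])
            else if v = st.1 then some (st.1, st.2 ++ [[kv.1, kv.2.1, days]])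
            else some st)
        st
      = kv.2.2.foldlM (fun st d => pvStepM dd st (kv.1, kv.2.1, d)) st := rfl
    rw [hinner]
    cases h : kv.2.2.foldlM (fun st d => pvStepM dd st (kv.1, kv.2.1, d)) st with
    | none => rfl
    | some st' => exact ih st'

theorem pvFoldlM_eq_mapM (dd : PySem.Dict String Int)
    (L : List (String × String × String)) (st : Int × List (List String)) :
    L.foldlM (pvStepM dd) st
    = (L.mapM (fun t => dd.get? t.2.2)).map (fun vals => (L.zip vals).foldl pvStep st) := by
  induction L generalizing st with
  | nil => rfl
  | cons t L ih =>
    rw [List.foldlM_cons, List.mapM_cons]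
    cases h : dd.get? t.2.2 with
    | none => simp [pvStepM, h]
    | some v =>
      have hstep : pvStepM dd st t = some (pvStep st (t, v)) := by
        simp only [pvStepM, h, pvStep]
        split_ifs <;> rfl
      rw [hstep]
      show List.foldlM (pvStepM dd) (pvStep st (t, v)) L = _
      rw [ih (pvStep st (t, v))]
      cases hm : L.mapM (fun t => dd.get? t.2.2) with
      | none => rfl
      | some vals => simp [List.zip_cons_cons]

theorem pvFoldlMaxLe {l : List Int} {a b : Int} (ha : a ≤ b) (h : ∀ y ∈ l, y ≤ b) :
    l.foldl max a ≤ b := by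
  induction l generalizing a with
  | nil => exact ha
  | cons x l ih =>
    exact ih (max_le ha (h x (by simp))) (fun y hy => h y (by simp [hy]))

theorem pvFused (L : List ((String × String × String) × Int)) (m0 : Int) (p0 : List (List String)) :
    L.foldl pvStep (m0, p0)
    = ((L.map Prod.snd).foldl max m0,
       (if m0 = (L.map Prod.snd).foldl max m0 then p0 else []) ++
         (L.filter (fun tv => tv.2 == (L.map Prod.snd).foldl max m0)).map (fun tv => pvRend tv.1)) := by
  induction L generalizing m0 p0 with
  | nil => simp
  | cons x L ih =>
    have hle : ∀ (c : Int), c ≤ (L.map Prod.snd).foldl max c :=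
      fun c => (PySem.List.le_foldl_max (L.map Prod.snd) c).1
    simp only [List.foldl_cons, List.map_cons, List.filter_cons]
    by_cases hgt : x.2 > m0
    · have hstep : pvStep (m0, p0) x = (x.2, [pvRend x.1]) := by
        simp [pvStep, hgt]
      have hmax : max m0 x.2 = x.2 := by omega
      rw [hstep, ih]; simp only [hmax]
      have hne : ¬ (m0 = (L.map Prod.snd).foldl max x.2) := by
        have := hle x.2; omega
      rw [if_neg hne]
      by_cases hx : x.2 = (L.map Prod.snd).foldl max x.2
      · simp [← hx]
      · have : (x.2 == (L.map Prod.snd).foldl max x.2) = false := by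
          simp [hx]
        simp [hx, this]
    · by_cases heq : x.2 = m0
      · have hstep : pvStep (m0, p0) x = (m0, p0 ++ [pvRend x.1]) := by
          simp [pvStep, heq]
        have hmax : max m0 x.2 = m0 := by omega
        rw [hstep, ih]; simp only [hmax]
        by_cases hm : m0 = (L.map Prod.snd).foldl max m0
        · rw [if_pos hm, if_pos hm]
          have hx : (x.2 == (L.map Prod.snd).foldl max m0) = true := by
            simp [heq, ← hm]
          simp [hx]
        · rw [if_neg hm, if_neg hm]
          have hx : (x.2 == (L.map Prod.snd).foldl max m0) = false := by
            simp; omega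
          simp [hx]
      · have hlt : x.2 < m0 := by omega
        have hstep : pvStep (m0, p0) x = (m0, p0) := by
          simp [pvStep, hgt, heq]
        have hmax : max m0 x.2 = m0 := by omega
        rw [hstep, ih]; simp only [hmax]
        have hx : (x.2 == (L.map Prod.snd).foldl max m0) = false := by
          have := hle m0; simp; omega
        simp [hx]

theorem pvMapM_length {α β : Type} {f : α → Option β} :
    ∀ {L : List α} {vs : List β}, L.mapM f = some vs → vs.length = L.length := by
  intro L
  induction L with
  | nil => intro vs h; simp [List.mapM_nil] at h; simp [← h]
  | cons x l ih =>
    intro vs h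
    rw [List.mapM_cons] at h
    cases hx : f x with
    | none => simp [hx] at h
    | some v =>
      cases hl : l.mapM f with
      | none => simp [hx, hl] at h
      | some vs' => simp [hx, hl] at h; simp [← h, ih hl]

theorem pvMapM_mem {α β : Type} {f : α → Option β} :
    ∀ {L : List α} {vs : List β}, L.mapM f = some vs → ∀ v ∈ vs, ∃ t ∈ L, f t = some v := by
  intro L
  induction L with
  | nil => intro vs h; simp [List.mapM_nil] at h; subst h; simp
  | cons x l ih =>
    intro vs h v hv
    rw [List.mapM_cons] at h
    cases hx : f x with
    | none => simp [hx] at h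
    | some w =>
      cases hl : l.mapM f with
      | none => simp [hx, hl] at h
      | some vs' =>
        simp [hx, hl] at h
        rw [← h] at hv
        rcases List.mem_cons.mp hv with h1 | h2
        · exact ⟨x, by simp, by rw [hx, h1]⟩
        · rcases ih hl v h2 with ⟨t, ht, hft⟩
          exact ⟨t, by simp [ht], hft⟩

theorem pvMapM_mem' {α β : Type} {f : α → Option β} :
    ∀ {L : List α} {vs : List β}, L.mapM f = some vs → ∀ t ∈ L, ∃ v ∈ vs, f t = some v := by
  intro L
  induction L with
  | nil => intro vs h; simp
  | cons x l ih =>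
    intro vs h t ht
    rw [List.mapM_cons] at h
    cases hx : f x with
    | none => simp [hx] at h
    | some w =>
      cases hl : l.mapM f with
      | none => simp [hx, hl] at h
      | some vs' =>
        simp [hx, hl] at h
        rcases List.mem_cons.mp ht with h1 | h2
        · exact ⟨w, by simp [← h], by rw [h1, hx]⟩
        · rcases ih hl t h2 with ⟨v, hv, hft⟩
          exact ⟨v, by simp [← h, hv], hft⟩

theorem pvMapM_isSome {α β : Type} {f : α → Option β} :
    ∀ {L : List α}, (∀ t ∈ L, (f t).isSome) → (L.mapM f).isSome := by
  intro L
  induction L with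
  | nil => intro _; simp [List.mapM_nil]
  | cons x l ih =>
    intro h
    rw [List.mapM_cons]
    have hx := h x (by simp)
    cases hfx : f x with
    | none => rw [hfx] at hx; simp at hx
    | some v =>
      have hl := ih (fun t ht => h t (by simp [ht]))
      cases hml : l.mapM f with
      | none => rw [hml] at hl; simp at hl
      | some vs => simp

theorem pvMax?_ne_none {vals : List Int} (h : vals ≠ []) :
    ∃ m, PySem.List.max? vals (id : Int → Int) = some m := by
  cases vals with
  | nil => simp at h
  | cons x l =>
    unfold PySem.List.max?
    simp only [List.foldl_cons]
    clear h
    induction l generalizing x with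
    | nil => exact ⟨x, rfl⟩
    | cons y l ih =>
      simp only [List.foldl_cons]
      by_cases hxy : id x < id y
      · rw [show (if id x < id y then some y else some x) = some y from if_pos hxy]
        exact ih y
      · rw [show (if id x < id y then some y else some x) = some x from if_neg hxy]
        exact ih x

-- relation between the day list and the triple list
theorem pvTriplesDays (items : List (String × String × List String)) :
    (items.flatMap (fun kv => kv.2.2.map (fun d => (kv.1, kv.2.1, d)))).map (fun t => t.2.2)
      = items.flatMap (fun kv => kv.2.2) := by
  simp [List.map_flatMap, List.map_map, Function.comp_def]

theorem pvAgreeAux (dd : PySem.Dict String Int) (items : List (String × String × List String))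
    (hnd : ¬ (items.flatMap (fun kv => kv.2.2) ≠ [] ∧
      ∀ day ∈ items.flatMap (fun kv => kv.2.2), ((dd.get? day).any (fun v => v < -1)) = true)) :
    (match items.foldlM
        (fun (st : Int × List (List String)) kv =>
          kv.2.2.foldlM
            (fun (st : Int × List (List String)) days =>
              match dd.get? days with
              | none => none
              | some v =>
                if v > st.1 then some (v, [[kv.1, kv.2.1, days]])
                else if v = st.1 then some (st.1, st.2 ++ [[kv.1, kv.2.1, days]])
                else some st)
            st)
        ((-1 : Int), ([] : List (List String))) with
      | none => none
      | some st => some st.2)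
    = (match (items.flatMap (fun kv => kv.2.2.map (fun d => (kv.1, kv.2.1, d)))).mapM
          (fun t => dd.get? t.2.2) with
      | none => none
      | some vals =>
        some ((((items.flatMap (fun kv => kv.2.2.map (fun d => (kv.1, kv.2.1, d)))).zip vals).filter
            (fun tv => tv.2 == PySem.List.maxD vals id (-1))).map
          (fun tv => [tv.1.1, tv.1.2.1, tv.1.2.2]))) := by
  set triples := items.flatMap (fun kv => kv.2.2.map (fun d => (kv.1, kv.2.1, d))) with htriples
  rw [pvFlattenA dd items ((-1 : Int), ([] : List (List String)))]
  rw [pvFoldlM_eq_mapM]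
  cases h : triples.mapM (fun t => dd.get? t.2.2) with
  | none => simp
  | some vals =>
    simp only [Option.map_some]
    have hlen : vals.length = triples.length := pvMapM_length h
    have hsnd : (triples.zip vals).map Prod.snd = vals := List.map_snd_zip (le_of_eq hlen)
    rw [pvFused, hsnd]
    simp only [ite_self, List.nil_append]
    by_cases hv : vals = []
    · subst hv
      have htr : triples = [] := by
        simp only [List.length_nil] at hlen
        exact List.length_eq_zero_iff.mp hlen.symm
      simp [htr]
    · obtain ⟨mx, hmx⟩ := pvMax?_ne_none hv
      have hmem : mx ∈ vals := PySem.List.max?_mem hmx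
      have hismax : ∀ y ∈ vals, y ≤ mx := fun y hy => PySem.List.max?_isMax hmx y hy
      have hmaxD : PySem.List.maxD vals id (-1) = mx := by
        simp [PySem.List.maxD, hmx]
      rw [hmaxD]
      by_cases hge : -1 ≤ mx
      · have hM : vals.foldl max (-1) = mx :=
          le_antisymm (pvFoldlMaxLe hge hismax)
            ((PySem.List.le_foldl_max vals (-1)).2 mx hmem)
        rw [hM]
        rfl
      · exfalso
        apply hnd
        constructor
        · intro hts
          have : triples = [] := by
            have := pvTriplesDays (items := items)
            rw [← htriples] at this
            rw [hts] at this
            exact List.map_eq_nil_iff.mp this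
          rw [this] at hlen
          simp at hlen
          exact hv hlen
        · intro day hday
          rw [← pvTriplesDays (items := items), ← htriples] at hday
          obtain ⟨t, ht, htday⟩ := List.mem_map.mp hday
          obtain ⟨v, hvmem, hlook⟩ := pvMapM_mem' h t ht
          have hvlt : v < -1 := lt_of_le_of_lt (hismax v hvmem) (by omega)
          rw [← htday, hlook]
          simp [hvlt]

theorem pvTightAux (dd : PySem.Dict String Int) (items : List (String × String × List String))
    (hts : items.flatMap (fun kv => kv.2.2) ≠ [])
    (hall : ∀ day ∈ items.flatMap (fun kv => kv.2.2), ((dd.get? day).any (fun v => v < -1)) = true) :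
    (match items.foldlM
        (fun (st : Int × List (List String)) kv =>
          kv.2.2.foldlM
            (fun (st : Int × List (List String)) days =>
              match dd.get? days with
              | none => none
              | some v =>
                if v > st.1 then some (v, [[kv.1, kv.2.1, days]])
                else if v = st.1 then some (st.1, st.2 ++ [[kv.1, kv.2.1, days]])
                else some st)
            st)
        ((-1 : Int), ([] : List (List String))) with
      | none => none
      | some st => some st.2)
    ≠ (match (items.flatMap (fun kv => kv.2.2.map (fun d => (kv.1, kv.2.1, d)))).mapM
          (fun t => dd.get? t.2.2) with
      | none => none
      | some vals =>
        some ((((items.flatMap (fun kv => kv.2.2.map (fun d => (kv.1, kv.2.1, d)))).zip vals).filter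
            (fun tv => tv.2 == PySem.List.maxD vals id (-1))).map
          (fun tv => [tv.1.1, tv.1.2.1, tv.1.2.2]))) := by
  set triples := items.flatMap (fun kv => kv.2.2.map (fun d => (kv.1, kv.2.1, d))) with htriples
  have hlook : ∀ t ∈ triples, ∃ v, dd.get? t.2.2 = some v ∧ v < -1 := by
    intro t ht
    have hday : t.2.2 ∈ items.flatMap (fun kv => kv.2.2) := by
      rw [← pvTriplesDays (items := items)]
      exact List.mem_map.mpr ⟨t, ht, rfl⟩
    have := hall t.2.2 hday
    cases hg : dd.get? t.2.2 with
    | none => rw [hg] at this; simp at this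
    | some v => rw [hg] at this; simp at this; exact ⟨v, rfl, this⟩
  have hsome : (triples.mapM (fun t => dd.get? t.2.2)).isSome :=
    pvMapM_isSome (fun t ht => by obtain ⟨v, hv, _⟩ := hlook t ht; simp [hv])
  obtain ⟨vals, h⟩ := Option.isSome_iff_exists.mp hsome
  rw [pvFlattenA dd items ((-1 : Int), ([] : List (List String)))]
  rw [pvFoldlM_eq_mapM, h]
  simp only [Option.map_some]
  have hlen : vals.length = triples.length := pvMapM_length h
  have hsnd : (triples.zip vals).map Prod.snd = vals := List.map_snd_zip (le_of_eq hlen)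
  rw [pvFused, hsnd]
  simp only [ite_self, List.nil_append]
  have hvallt : ∀ v ∈ vals, v < -1 := by
    intro v hv
    obtain ⟨t, ht, hft⟩ := pvMapM_mem h v hv
    obtain ⟨w, hw, hwlt⟩ := hlook t ht
    rw [hft] at hw
    injection hw with hw
    omega
  have hM : vals.foldl max (-1) = -1 :=
    le_antisymm (pvFoldlMaxLe le_rfl (fun y hy => le_of_lt (hvallt y hy)))
      ((PySem.List.le_foldl_max vals (-1)).1)
  rw [hM]
  have hAfilter : (triples.zip vals).filter (fun tv => tv.2 == (-1 : Int)) = [] := by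
    apply List.filter_eq_nil_iff.mpr
    intro tv htv
    have : tv.2 ∈ vals := by
      rw [← hsnd]; exact List.mem_map.mpr ⟨tv, htv, rfl⟩
    have := hvallt tv.2 this
    simp; omega
  rw [hAfilter]
  -- B side: nonempty
  have hv : vals ≠ [] := by
    intro hnil
    subst hnil
    simp at hlen
    have htr : triples = [] := List.length_eq_zero_iff.mp hlen.symm
    apply hts
    have := pvTriplesDays (items := items)
    rw [← htriples, htr] at this
    exact this.symm.trans rfl
  obtain ⟨mx, hmx⟩ := pvMax?_ne_none hv
  have hmem : mx ∈ vals := PySem.List.max?_mem hmx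
  have hmaxD : PySem.List.maxD vals id (-1) = mx := by
    simp [PySem.List.maxD, hmx]
  rw [hmaxD]
  have hmem' : mx ∈ (triples.zip vals).map Prod.snd := by rw [hsnd]; exact hmem
  obtain ⟨tv, htv, htv2⟩ := List.mem_map.mp hmem'
  have hfil : tv ∈ (triples.zip vals).filter (fun tv => tv.2 == mx) :=
    List.mem_filter.mpr ⟨htv, by simp [htv2]⟩
  have hne : ((triples.zip vals).filter (fun tv => tv.2 == mx)).map
      (fun tv => [tv.1.1, tv.1.2.1, tv.1.2.2]) ≠ [] := by
    simp only [ne_eq, List.map_eq_nil_iff]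
    exact List.ne_nil_of_mem hfil
  intro hcontra
  injection hcontra with hcontra
  exact hne (by simp [← hcontra])

-- ===== VERDICT (by name: the statement is the Claim_ definition above) =====
theorem maxSlots_spec : Claim_unchanged_maxSlots := by
  intro sa sd _hdom hnd
  unfold D_maxSlots at hnd
  exact pvAgreeAux (PySem.Dict.ofList sd) ((PySem.Dict.ofList sa).items) hnd

theorem maxSlots_changed : Claim_changed_maxSlots := by
  unfold Claim_changed_maxSlots; decide

theorem maxSlots_tight : Claim_exact_maxSlots := by
  intro sa sd _hdom hd
  unfold D_maxSlots at hd
  exact pvTightAux (PySem.Dict.ofList sd) ((PySem.Dict.ofList sa).items) hd.1 hd.2
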